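-- pv_equiv track=rewrite | github.com/simicjovana/p1 | domaci5/zadatak2dz5.py | sortiranje_zanrova
-- ===== SOURCE A (Python) =====
-- def sortiranje_zanrova(recnik, zanrovi_od_interesa):
--     #uzima {reziser1: {zanr1:broj, zanr2:broj...}...}
--     #vraca {reziser : [(zanr1 , broj),(zanr2 , broj)]...}
--     recnik_novo = {}
--     for reziser,zanrovi in recnik.items():
--         for zanr_od_interesa in zanrovi_od_interesa:
--             if zanr_od_interesa not in zanrovi.keys():
--                 recnik[reziser][zanr_od_interesa] = 0
--
--         for zanr,broj in zanrovi.items():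
--             if reziser not in recnik_novo.keys():
--                 recnik_novo[reziser] = [(zanr,broj)]
--             else:
--                 recnik_novo[reziser].append((zanr,broj))
--
--     for reziser,zanrovi in recnik_novo.items():
--         recnik_novo[reziser]=sorted(zanrovi,key= lambda  torka : torka[0])
--     return recnik_novo
-- ===== SOURCE B (Python) =====
-- # B: per director, sort the union of genre names once and pair each name with its
-- # count via .get(name, 0) -- no fill pass, no append-building, no tuple sort.
-- # NOTE: A mutates recnik in place (adds zero counts to the inner dicts); B does not
-- # touch recnik -- the equivalence claimed is about the return value only.
-- def sortiranje_zanrova(recnik, zanrovi_od_interesa):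
--     recnik_novo = {}
--     for reziser, zanrovi in recnik.items():
--         imena = sorted(set(zanrovi) | set(zanrovi_od_interesa))
--         recnik_novo[reziser] = [(ime, zanrovi.get(ime, 0)) for ime in imena]
--     return recnik_novo
-- ===== Notes on version B (the rewrite author's own statement) =====
-- stated objective: simpler
-- what changed: Per director, B replaces A's three passes (mutate missing genres of interest into the inner dict, build the (genre,count) list by membership-branched appends, then sort the tuples by a key lambda) with a single pass that sorts the union of genre names once and pairs each name with zanrovi.get(name, 0); B never mutates recnik (A does, return value is unaffected).
-- outside the precondition, e.g. on sortiranje_zanrova({'x': {}}, []): A returns {}, B returns {'x': []}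
import Mathlib
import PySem

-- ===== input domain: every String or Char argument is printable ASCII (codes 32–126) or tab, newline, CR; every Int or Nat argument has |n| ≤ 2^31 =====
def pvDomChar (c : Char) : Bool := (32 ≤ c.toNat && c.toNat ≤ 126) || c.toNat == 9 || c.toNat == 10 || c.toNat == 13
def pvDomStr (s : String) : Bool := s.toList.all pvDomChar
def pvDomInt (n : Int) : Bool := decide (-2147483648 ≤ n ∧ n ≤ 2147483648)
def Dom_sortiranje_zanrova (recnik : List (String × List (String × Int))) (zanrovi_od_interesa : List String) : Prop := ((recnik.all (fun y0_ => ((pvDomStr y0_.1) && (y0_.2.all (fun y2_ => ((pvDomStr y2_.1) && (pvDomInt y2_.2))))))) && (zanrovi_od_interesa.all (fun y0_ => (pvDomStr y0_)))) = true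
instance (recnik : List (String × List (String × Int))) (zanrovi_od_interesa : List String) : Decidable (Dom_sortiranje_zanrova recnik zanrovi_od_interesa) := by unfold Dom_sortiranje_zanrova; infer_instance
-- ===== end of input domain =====

-- ===== PORT A =====
-- B changes: one pass per director over the sorted union of genre names instead of A's
-- fill/append-build/sort passes (objective: simpler). A mutates recnik in place (adds
-- zero counts to the inner dicts); B does not — the equivalence proved is about the
-- return value only.
-- A-side helper: the first inner loop of A (fill missing genres of interest with 0).
def pvFill (zanrovi_od_interesa : List String) (zs : List (String × Int)) : PySem.Dict String Int :=
  zanrovi_od_interesa.foldl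
    (fun zanrovi z => if zanrovi.contains z then zanrovi else zanrovi.insert z 0)
    (PySem.Dict.mk zs)

def sortiranje_zanrova (recnik : List (String × List (String × Int))) (zanrovi_od_interesa : List String) : List (String × List (String × Int)) :=
  let recnik_novo : PySem.Dict String (List (String × Int)) :=
    recnik.foldl
      (fun recnik_novo rz =>
        let zanrovi := pvFill zanrovi_od_interesa rz.2
        zanrovi.items.foldl
          (fun recnik_novo q =>
            if recnik_novo.contains rz.1 then recnik_novo.modify rz.1 [] (fun l => l ++ [q])
            else recnik_novo.insert rz.1 [q])
          recnik_novo)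
      PySem.Dict.empty
  (recnik_novo.items.foldl
      (fun d p => d.insert p.1 (PySem.List.sorted p.2 (fun torka => torka.1) false))
      recnik_novo).items

-- ===== PORT B =====
-- B-side helper: the per-director value  [(ime, zanrovi.get(ime, 0)) for ime in sorted(set(zanrovi) | set(zoi))].
def pvBval (zanrovi_od_interesa : List String) (zs : List (String × Int)) : List (String × Int) :=
  (PySem.List.sorted
      (PySem.Set.union (PySem.Set.ofList (zs.map Prod.fst)) (PySem.Set.ofList zanrovi_od_interesa))
      (fun x => x) false).map
    (fun ime => (ime, (PySem.Dict.mk zs).getD ime 0))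

def sortiranje_zanrova_alt (recnik : List (String × List (String × Int))) (zanrovi_od_interesa : List String) : List (String × List (String × Int)) :=
  (recnik.foldl
      (fun recnik_novo rz => recnik_novo.insert rz.1 (pvBval zanrovi_od_interesa rz.2))
      (PySem.Dict.empty : PySem.Dict String (List (String × Int)))).items

-- ===== PRECONDITION & SPEC =====
-- Pre_ excludes association lists with duplicate director or genre keys (those do not
-- represent Python dicts), and the corner where zanrovi_od_interesa is empty and some
-- director's genre dict is empty: there A silently omits that director from the result
-- while B keeps it with an empty list — both readings are defensible on this
-- unspecified corner.
def Pre_sortiranje_zanrova (recnik : List (String × List (String × Int))) (zanrovi_od_interesa : List String) : Prop :=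
  (recnik.map Prod.fst).Nodup ∧ (∀ p ∈ recnik, (p.2.map Prod.fst).Nodup) ∧
    (zanrovi_od_interesa = [] → ∀ p ∈ recnik, p.2 ≠ [])
instance (recnik : List (String × List (String × Int))) (zanrovi_od_interesa : List String) : Decidable (Pre_sortiranje_zanrova recnik zanrovi_od_interesa) := by unfold Pre_sortiranje_zanrova; infer_instance
def pvWitness_sortiranje_zanrova : (List (String × List (String × Int))) × List String :=
  ([("ana", [("drama", 2), ("horor", 1)]), ("bob", [])], ["drama", "sf"])
def Spec_sortiranje_zanrova (recnik : List (String × List (String × Int))) (zanrovi_od_interesa : List String) (out : List (String × List (String × Int))) : Prop := out = sortiranje_zanrova_alt recnik zanrovi_od_interesa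
instance (recnik : List (String × List (String × Int))) (zanrovi_od_interesa : List String) (out : List (String × List (String × Int))) : Decidable (Spec_sortiranje_zanrova recnik zanrovi_od_interesa out) := by unfold Spec_sortiranje_zanrova; infer_instance

-- ===== CLAIM (what is proved, stated in full; the proofs are below) =====
def Claim_equal_sortiranje_zanrova : Prop := ∀ (recnik : List (String × List (String × Int))) (zanrovi_od_interesa : List String), Dom_sortiranje_zanrova recnik zanrovi_od_interesa → Pre_sortiranje_zanrova recnik zanrovi_od_interesa → Spec_sortiranje_zanrova recnik zanrovi_od_interesa (sortiranje_zanrova recnik zanrovi_od_interesa)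

-- ===== LEMMAS AND PROOFS =====

-- getD through the fill loop is unchanged (missing genres get the value 0 = default).
theorem pv_getD_fill (zanrovi_od_interesa : List String) (d : PySem.Dict String Int) (n : String) :
    (zanrovi_od_interesa.foldl
        (fun zanrovi z => if zanrovi.contains z then zanrovi else zanrovi.insert z 0) d).getD n 0
      = d.getD n 0 := by
  induction zanrovi_od_interesa generalizing d with
  | nil => rfl
  | cons z zoi ih =>
    simp only [List.foldl_cons]
    by_cases hc : d.contains z = true
    · simp [hc, ih]
    · have hc' : d.contains z = false := by simpa using hc
      rw [if_neg (by simp [hc']), ih, PySem.Dict.getD_insert]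
      split_ifs with he
      · subst he; exact (PySem.Dict.getD_of_not_contains d 0 hc').symm
      · rfl

-- keys of the fill result: old keys plus the genres of interest.
theorem pv_mem_keys_fill (zanrovi_od_interesa : List String) (d : PySem.Dict String Int) (n : String) :
    (n ∈ (zanrovi_od_interesa.foldl
        (fun zanrovi z => if zanrovi.contains z then zanrovi else zanrovi.insert z 0) d).keys)
      ↔ (n ∈ d.keys ∨ n ∈ zanrovi_od_interesa) := by
  induction zanrovi_od_interesa generalizing d with
  | nil => simp
  | cons z zoi ih =>
    simp only [List.foldl_cons]
    by_cases hc : d.contains z = true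
    · rw [if_pos hc, ih]
      have hz : z ∈ d.keys := (PySem.Dict.contains_iff_mem_keys d z).mp hc
      constructor
      · rintro (h | h) <;> simp [h]
      · rintro (h | h)
        · exact Or.inl h
        · rcases List.mem_cons.mp h with h | h
          · exact Or.inl (h ▸ hz)
          · exact Or.inr h
    · rw [if_neg (by simp [hc]), ih]
      rw [PySem.Dict.mem_keys_insert]
      constructor
      · rintro (⟨h|h⟩ | h) <;> simp [h]
      · rintro (h | h)
        · exact Or.inl (Or.inr h)
        · rcases List.mem_cons.mp h with h | h
          · exact Or.inl (Or.inl h)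
          · exact Or.inr h

theorem pv_nodup_keys_fill (zanrovi_od_interesa : List String) (d : PySem.Dict String Int)
    (h : d.keys.Nodup) :
    (zanrovi_od_interesa.foldl
        (fun zanrovi z => if zanrovi.contains z then zanrovi else zanrovi.insert z 0) d).keys.Nodup := by
  induction zanrovi_od_interesa generalizing d with
  | nil => exact h
  | cons z zoi ih =>
    simp only [List.foldl_cons]
    by_cases hc : d.contains z = true
    · rw [if_pos hc]; exact ih d h
    · rw [if_neg (by simp [hc])]
      refine ih _ ?_
      rw [PySem.Dict.keys_insert_of_not_contains d 0 (by simpa using hc)]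
      rw [List.nodup_append]
      refine ⟨h, List.nodup_singleton z, ?_⟩
      intro a ha b hb
      rw [List.mem_singleton] at hb
      subst hb
      intro hab; subst hab
      exact hc ((PySem.Dict.contains_iff_mem_keys d _).mpr ha)

theorem pv_fill_ne_nil (zanrovi_od_interesa : List String) (zs : List (String × Int))
    (h : zanrovi_od_interesa = [] → zs ≠ []) :
    (pvFill zanrovi_od_interesa zs).items ≠ [] := by
  intro hit
  have hk : (pvFill zanrovi_od_interesa zs).keys = [] := by
    have : (pvFill zanrovi_od_interesa zs).keys = (pvFill zanrovi_od_interesa zs).items.map Prod.fst := rfl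
    rw [this, hit]; rfl
  cases hzo : zanrovi_od_interesa with
  | nil =>
    have hzs : zs ≠ [] := h hzo
    have : (pvFill zanrovi_od_interesa zs).items = zs := by rw [hzo]; rfl
    rw [this] at hit; exact hzs hit
  | cons z rest =>
    have hz : z ∈ (pvFill zanrovi_od_interesa zs).keys := by
      unfold pvFill
      exact (pv_mem_keys_fill zanrovi_od_interesa (PySem.Dict.mk zs) z).mpr (Or.inr (by simp [hzo]))
    rw [hk] at hz
    exact List.not_mem_nil hz

-- membership in the filled dict's items, characterised by the ORIGINAL dict.
theorem pv_mem_items_fill (zanrovi_od_interesa : List String) (zs : List (String × Int))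
    (h : (zs.map Prod.fst).Nodup) (p : String × Int) :
    p ∈ (pvFill zanrovi_od_interesa zs).items
      ↔ ((p.1 ∈ zs.map Prod.fst ∨ p.1 ∈ zanrovi_od_interesa) ∧ p.2 = (PySem.Dict.mk zs).getD p.1 0) := by
  obtain ⟨k, v⟩ := p
  have hnd : (pvFill zanrovi_od_interesa zs).keys.Nodup := by
    unfold pvFill
    exact pv_nodup_keys_fill zanrovi_od_interesa (PySem.Dict.mk zs) (by simpa using h)
  have hkeys : ∀ n, n ∈ (pvFill zanrovi_od_interesa zs).keys ↔ (n ∈ zs.map Prod.fst ∨ n ∈ zanrovi_od_interesa) := by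
    intro n
    unfold pvFill
    rw [pv_mem_keys_fill]
    simp [PySem.Dict.keys_mk]
  have hgd : ∀ n, (pvFill zanrovi_od_interesa zs).getD n 0 = (PySem.Dict.mk zs).getD n 0 := by
    intro n; unfold pvFill; exact pv_getD_fill zanrovi_od_interesa (PySem.Dict.mk zs) n
  constructor
  · intro hp
    have hg : (pvFill zanrovi_od_interesa zs).get? k = some v :=
      (PySem.Dict.get?_eq_some_iff_mem_items _ k v hnd).mpr hp
    have hco : (pvFill zanrovi_od_interesa zs).contains k = true := by
      rw [PySem.Dict.contains_eq_isSome_get?, hg]; rfl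
    refine ⟨(hkeys k).mp ((PySem.Dict.contains_iff_mem_keys _ k).mp hco), ?_⟩
    have : (pvFill zanrovi_od_interesa zs).getD k 0 = v := by
      rw [PySem.Dict.getD_eq_get?_getD, hg]; rfl
    show v = (PySem.Dict.mk zs).getD k 0
    rw [← this, hgd]
  · rintro ⟨hk, hv⟩
    have hco : (pvFill zanrovi_od_interesa zs).contains k = true :=
      (PySem.Dict.contains_iff_mem_keys _ k).mpr ((hkeys k).mpr hk)
    rw [PySem.Dict.contains_eq_isSome_get?] at hco
    obtain ⟨w, hw⟩ := Option.isSome_iff_exists.mp hco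
    have hwv : w = v := by
      have h1 : (pvFill zanrovi_od_interesa zs).getD k 0 = w := by
        rw [PySem.Dict.getD_eq_get?_getD, hw]; rfl
      rw [hgd] at h1
      have hv2 : v = (PySem.Dict.mk zs).getD k 0 := hv
      rw [hv2, ← h1]
    subst hwv
    exact (PySem.Dict.get?_eq_some_iff_mem_items _ k w hnd).mp hw

theorem pv_dict_eq_of_items {κ ν : Type} (d : PySem.Dict κ ν) (l : List (κ × ν))
    (h : d.items = l) : d = PySem.Dict.mk l := by
  cases d; simpa using h

theorem pv_contains_mk_append_self (r : String) (its : List (String × List (String × Int)))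
    (acc0 : List (String × Int)) :
    (PySem.Dict.mk (its ++ [(r, acc0)])).contains r = true := by
  simp [PySem.Dict.contains]

theorem pv_inner_tail (r : String) (novo : PySem.Dict String (List (String × Int)))
    (hr : novo.contains r = false) (rest : List (String × Int)) :
    ∀ (acc0 : List (String × Int)),
    rest.foldl
        (fun recnik_novo q =>
          if recnik_novo.contains r then recnik_novo.modify r [] (fun l => l ++ [q])
          else recnik_novo.insert r [q])
        (PySem.Dict.mk (novo.items ++ [(r, acc0)]))
      = PySem.Dict.mk (novo.items ++ [(r, acc0 ++ rest)]) := by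
  have hall : ∀ p ∈ novo.items, (p.1 == r) = false := by
    intro p hp
    by_contra hb
    rw [Bool.not_eq_false] at hb
    have : novo.contains r = true := by
      unfold PySem.Dict.contains
      exact List.any_eq_true.mpr ⟨p, hp, hb⟩
    rw [this] at hr; exact Bool.true_eq_false.mp hr
  induction rest with
  | nil => intro acc0; simp
  | cons q rest ih =>
    intro acc0
    simp only [List.foldl_cons]
    rw [if_pos (pv_contains_mk_append_self r novo.items acc0)]
    have hget : (PySem.Dict.mk (novo.items ++ [(r, acc0)])).getD r [] = acc0 := by
      unfold PySem.Dict.getD PySem.Dict.get?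
      rw [List.find?_append]
      have hnone : List.find? (fun p => p.1 == r) novo.items = none :=
        List.find?_eq_none.mpr (fun p hp => by simp [hall p hp])
      simp [hnone]
    have hmod : (PySem.Dict.mk (novo.items ++ [(r, acc0)])).modify r [] (fun l => l ++ [q])
        = PySem.Dict.mk (novo.items ++ [(r, acc0 ++ [q])]) := by
      unfold PySem.Dict.modify
      rw [hget]
      apply pv_dict_eq_of_items
      rw [PySem.Dict.items_insert_of_contains _ _ (pv_contains_mk_append_self r novo.items acc0)]
      show List.map _ (novo.items ++ [(r, acc0)]) = _
      rw [List.map_append, List.map_singleton]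
      congr 1
      · calc List.map (fun p => if (p.1 == r) = true then (r, acc0 ++ [q]) else p) novo.items
            = List.map id novo.items := List.map_congr_left (fun p hp => by simp [hall p hp])
          _ = novo.items := List.map_id novo.items
      · simp
    rw [hmod, ih (acc0 ++ [q])]
    simp

-- A's second inner loop: appending all of l under one fresh key r adds (r, l) at the end.
theorem pv_inner_build (r : String) (l : List (String × Int))
    (novo : PySem.Dict String (List (String × Int)))
    (hr : novo.contains r = false) (hl : l ≠ []) :
    l.foldl
        (fun recnik_novo q =>
          if recnik_novo.contains r then recnik_novo.modify r [] (fun l => l ++ [q])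
          else recnik_novo.insert r [q])
        novo
      = PySem.Dict.mk (novo.items ++ [(r, l)]) := by
  cases l with
  | nil => exact absurd rfl hl
  | cons q rest =>
    simp only [List.foldl_cons]
    rw [if_neg (by simp [hr])]
    have h1 : novo.insert r [q] = PySem.Dict.mk (novo.items ++ [(r, [q])]) :=
      pv_dict_eq_of_items _ _ (PySem.Dict.items_insert_of_not_contains novo [q] hr)
    rw [h1, pv_inner_tail r novo hr rest [q]]
    simp

-- A's outer loop builds exactly the list of (director, filled items) pairs.
theorem pv_outer_A (zanrovi_od_interesa : List String)
    (rs : List (String × List (String × Int))) (novo : PySem.Dict String (List (String × Int)))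
    (hnd : (novo.keys ++ rs.map Prod.fst).Nodup)
    (hne : ∀ p ∈ rs, (pvFill zanrovi_od_interesa p.2).items ≠ []) :
    rs.foldl
        (fun recnik_novo rz =>
          let zanrovi := pvFill zanrovi_od_interesa rz.2
          zanrovi.items.foldl
            (fun recnik_novo q =>
              if recnik_novo.contains rz.1 then recnik_novo.modify rz.1 [] (fun l => l ++ [q])
              else recnik_novo.insert rz.1 [q])
            recnik_novo)
        novo
      = PySem.Dict.mk (novo.items ++ rs.map (fun p => (p.1, (pvFill zanrovi_od_interesa p.2).items))) := by
  induction rs generalizing novo with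
  | nil => simp
  | cons p rs ih =>
    simp only [List.foldl_cons]
    have hp1 : novo.contains p.1 = false := by
      rw [Bool.eq_false_iff]
      intro hb
      have hmem : p.1 ∈ novo.keys := (PySem.Dict.contains_iff_mem_keys novo p.1).mp hb
      have hdisj := (List.nodup_append.mp hnd).2.2
      exact hdisj _ hmem _ (by simp) rfl
    rw [pv_inner_build p.1 (pvFill zanrovi_od_interesa p.2).items novo hp1
          (hne p List.mem_cons_self)]
    have hkm : (PySem.Dict.mk (novo.items ++ [(p.1, (pvFill zanrovi_od_interesa p.2).items)])).keys
        = novo.keys ++ [p.1] := by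
      show (novo.items ++ [(p.1, (pvFill zanrovi_od_interesa p.2).items)]).map (fun x => x.1)
          = novo.keys ++ [p.1]
      rw [List.map_append]
      rfl
    have hnd2 : ((PySem.Dict.mk (novo.items ++ [(p.1, (pvFill zanrovi_od_interesa p.2).items)])).keys
        ++ rs.map Prod.fst).Nodup := by
      rw [hkm, List.append_assoc]
      simpa using hnd
    rw [ih (PySem.Dict.mk (novo.items ++ [(p.1, (pvFill zanrovi_od_interesa p.2).items)])) hnd2
          (fun q hq => hne q (List.mem_cons_of_mem p hq))]
    simp

-- A's final loop: overwriting every present key with the sorted value maps over the items.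
theorem pv_final_A (cur pre : List (String × List (String × Int)))
    (h : ((pre ++ cur).map Prod.fst).Nodup) :
    cur.foldl
        (fun d p => d.insert p.1 (PySem.List.sorted p.2 (fun torka => torka.1) false))
        (PySem.Dict.mk (pre ++ cur))
      = PySem.Dict.mk (pre ++ cur.map (fun p => (p.1, PySem.List.sorted p.2 (fun torka => torka.1) false))) := by
  induction cur generalizing pre with
  | nil => simp
  | cons p rest ih =>
    simp only [List.foldl_cons]
    rw [List.map_append, List.map_cons, List.nodup_append] at h
    obtain ⟨hnd1, hnd2, hdisj⟩ := h
    have hpnotin : p.1 ∉ rest.map Prod.fst := (List.nodup_cons.mp hnd2).1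
    have hpre : ∀ a ∈ pre, (a.1 == p.1) = false := by
      intro a ha
      simpa using hdisj _ (List.mem_map_of_mem ha) _ List.mem_cons_self
    have hrest : ∀ a ∈ rest, (a.1 == p.1) = false := by
      intro a ha
      have : a.1 ∈ rest.map Prod.fst := List.mem_map_of_mem ha
      simp only [beq_eq_false_iff_ne, ne_eq]
      intro he; rw [he] at this; exact hpnotin this
    have hcont : (PySem.Dict.mk (pre ++ p :: rest)).contains p.1 = true := by
      unfold PySem.Dict.contains
      exact List.any_eq_true.mpr ⟨p, by simp, by simp⟩
    have hins : (PySem.Dict.mk (pre ++ p :: rest)).insert p.1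
          (PySem.List.sorted p.2 (fun torka => torka.1) false)
        = PySem.Dict.mk ((pre ++ [(p.1, PySem.List.sorted p.2 (fun torka => torka.1) false)]) ++ rest) := by
      apply pv_dict_eq_of_items
      rw [PySem.Dict.items_insert_of_contains _ _ hcont]
      show List.map _ (pre ++ p :: rest) = _
      rw [List.map_append, List.map_cons, List.append_assoc]
      congr 1
      · calc List.map (fun q => if (q.1 == p.1) = true
                then (p.1, PySem.List.sorted p.2 (fun torka => torka.1) false) else q) pre
            = List.map id pre := List.map_congr_left (fun a ha => by simp [hpre a ha])
          _ = pre := List.map_id pre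
      · congr 1
        · simp
        · calc List.map (fun q => if (q.1 == p.1) = true
                  then (p.1, PySem.List.sorted p.2 (fun torka => torka.1) false) else q) rest
              = List.map id rest := List.map_congr_left (fun a ha => by simp [hrest a ha])
            _ = rest := List.map_id rest
    have hnd' : (((pre ++ [(p.1, PySem.List.sorted p.2 (fun torka => torka.1) false)]) ++ rest).map Prod.fst).Nodup := by
      rw [List.map_append, List.map_append]
      simp only [List.map_singleton]
      rw [List.append_assoc]
      show (pre.map Prod.fst ++ ([p.1] ++ rest.map Prod.fst)).Nodup
      rw [List.nodup_append]
      exact ⟨hnd1, by simpa using hnd2, by simpa using hdisj⟩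
    rw [hins, ih _ hnd']
    simp

theorem pv_outer_B (zanrovi_od_interesa : List String) (rs : List (String × List (String × Int))) :
    ∀ (novo : PySem.Dict String (List (String × Int))),
      (∀ p ∈ rs, novo.contains p.1 = false) → (rs.map Prod.fst).Nodup →
      rs.foldl (fun recnik_novo rz => recnik_novo.insert rz.1 (pvBval zanrovi_od_interesa rz.2)) novo
        = PySem.Dict.mk (novo.items ++ rs.map (fun p => (p.1, pvBval zanrovi_od_interesa p.2))) := by
  induction rs with
  | nil => intro novo _ _; simp
  | cons p rs ih =>
    intro novo hf hnd
    simp only [List.foldl_cons]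
    have hpnotin : p.1 ∉ rs.map Prod.fst := by
      have : (p.1 :: rs.map Prod.fst).Nodup := by simpa using hnd
      exact (List.nodup_cons.mp this).1
    have h1 : novo.insert p.1 (pvBval zanrovi_od_interesa p.2)
        = PySem.Dict.mk (novo.items ++ [(p.1, pvBval zanrovi_od_interesa p.2)]) :=
      pv_dict_eq_of_items _ _
        (PySem.Dict.items_insert_of_not_contains novo _ (hf p List.mem_cons_self))
    rw [h1, ih _ ?_ ?_]
    · simp
    · intro q hq
      have ha : novo.items.any (fun t => t.1 == q.1) = false := hf q (List.mem_cons_of_mem p hq)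
      have hb : (p.1 == q.1) = false := by
        simp only [beq_eq_false_iff_ne, ne_eq]
        intro he
        exact hpnotin (he ▸ List.mem_map_of_mem hq)
      show ((novo.items ++ [(p.1, pvBval zanrovi_od_interesa p.2)]).any (fun t => t.1 == q.1)) = false
      rw [List.any_append, ha, Bool.false_or]
      simp [hb]
    · have : (p.1 :: rs.map Prod.fst).Nodup := by simpa using hnd
      exact this.of_cons

-- per director: sorting the filled items by genre = B's sorted-names value.
theorem pv_per_director (zanrovi_od_interesa : List String) (zs : List (String × Int))
    (h : (zs.map Prod.fst).Nodup) :
    PySem.List.sorted (pvFill zanrovi_od_interesa zs).items (fun torka => torka.1) false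
      = pvBval zanrovi_od_interesa zs := by
  unfold pvBval
  have hundup : (PySem.Set.union (PySem.Set.ofList (zs.map Prod.fst))
      (PySem.Set.ofList zanrovi_od_interesa)).Nodup :=
    PySem.Set.nodup_union _ _ (PySem.Set.nodup_ofList _)
  have hnamesnd : (PySem.List.sorted (PySem.Set.union (PySem.Set.ofList (zs.map Prod.fst))
      (PySem.Set.ofList zanrovi_od_interesa)) (fun x => x) false).Nodup :=
    ((PySem.List.sorted_perm _ _ _).nodup_iff).mpr hundup
  have hmemnames : ∀ n, n ∈ PySem.List.sorted (PySem.Set.union (PySem.Set.ofList (zs.map Prod.fst))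
      (PySem.Set.ofList zanrovi_od_interesa)) (fun x => x) false
        ↔ (n ∈ zs.map Prod.fst ∨ n ∈ zanrovi_od_interesa) := by
    intro n
    rw [PySem.List.mem_sorted, PySem.Set.mem_union]
    simp [PySem.Set.mem_ofList]
  have hndmap : ((PySem.List.sorted (PySem.Set.union (PySem.Set.ofList (zs.map Prod.fst))
      (PySem.Set.ofList zanrovi_od_interesa)) (fun x => x) false).map
        (fun ime => (ime, (PySem.Dict.mk zs).getD ime 0))).Nodup :=
    List.Nodup.map (fun a b hab => congrArg Prod.fst hab) hnamesnd
  have hnditems : (pvFill zanrovi_od_interesa zs).items.Nodup := by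
    have hk : (pvFill zanrovi_od_interesa zs).keys.Nodup := by
      unfold pvFill
      exact pv_nodup_keys_fill zanrovi_od_interesa (PySem.Dict.mk zs) (by simpa using h)
    exact List.Nodup.of_map _ hk
  refine PySem.List.sorted_eq_of_perm_of_pairwise_lt _ _ _ ?_ ?_
  · rw [List.perm_ext_iff_of_nodup hndmap hnditems]
    intro a
    rw [List.mem_map, pv_mem_items_fill zanrovi_od_interesa zs h a]
    constructor
    · rintro ⟨n, hn, he⟩
      rw [← he]
      exact ⟨by simpa using (hmemnames n).mp hn, rfl⟩
    · rintro ⟨hk, hv⟩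
      exact ⟨a.1, (hmemnames a.1).mpr hk, by rw [← hv]⟩
  · rw [List.pairwise_map]
    have hle : (PySem.List.sorted (PySem.Set.union (PySem.Set.ofList (zs.map Prod.fst))
        (PySem.Set.ofList zanrovi_od_interesa)) (fun x => x) false).Pairwise (fun a b => a ≤ b) := by
      simpa using PySem.List.sorted_pairwise (PySem.Set.union (PySem.Set.ofList (zs.map Prod.fst))
        (PySem.Set.ofList zanrovi_od_interesa)) (fun x => x)
    have hne' : (PySem.List.sorted (PySem.Set.union (PySem.Set.ofList (zs.map Prod.fst))
        (PySem.Set.ofList zanrovi_od_interesa)) (fun x => x) false).Pairwise (· ≠ ·) := hnamesnd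
    exact (hle.and hne').imp (fun hab => lt_of_le_of_ne hab.1 hab.2)

-- ===== VERDICT (by name: the statement is the Claim_ definition above) =====
theorem sortiranje_zanrova_spec : Claim_equal_sortiranje_zanrova := by
  intro recnik zanrovi_od_interesa hdom hpre
  obtain ⟨h1, h2, h3⟩ := hpre
  unfold Spec_sortiranje_zanrova sortiranje_zanrova sortiranje_zanrova_alt
  rw [pv_outer_B zanrovi_od_interesa recnik PySem.Dict.empty (fun p _ => rfl) h1]
  have hA := pv_outer_A zanrovi_od_interesa recnik PySem.Dict.empty (by simpa using h1)
    (fun p hp => pv_fill_ne_nil zanrovi_od_interesa p.2 (fun hz => h3 hz p hp))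
  rw [hA]
  have hndL : ((([] : List (String × List (String × Int)))
      ++ recnik.map (fun p => (p.1, (pvFill zanrovi_od_interesa p.2).items))).map Prod.fst).Nodup := by
    simpa [List.map_map, Function.comp] using h1
  have hfin := pv_final_A (recnik.map (fun p => (p.1, (pvFill zanrovi_od_interesa p.2).items))) [] hndL
  rw [List.nil_append] at hfin
  show ((PySem.Dict.mk (recnik.map (fun p => (p.1, (pvFill zanrovi_od_interesa p.2).items)))).items.foldl
      _ (PySem.Dict.mk (recnik.map (fun p => (p.1, (pvFill zanrovi_od_interesa p.2).items))))).items = _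
  rw [hfin]
  show ([] : List (String × List (String × Int)))
      ++ (recnik.map (fun p => (p.1, (pvFill zanrovi_od_interesa p.2).items))).map
        (fun p => (p.1, PySem.List.sorted p.2 (fun torka => torka.1) false))
      = ([] : List (String × List (String × Int)))
      ++ recnik.map (fun p => (p.1, pvBval zanrovi_od_interesa p.2))
  rw [List.nil_append, List.nil_append, List.map_map]
  apply List.map_congr_left
  intro p hp
  have hd := pv_per_director zanrovi_od_interesa p.2 (h2 p hp)
  simp [Function.comp, hd]
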